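-- pv_equiv track=rewrite | github.com/dedeco/leetcode-solutions | solutions/shift_to_left.py | shift_to_left
-- ===== SOURCE A (Python) =====
-- from typing import List
--
-- def shift_to_left(arr: List[int]):
--     nums = []
--     for n in arr:
--         if n != 0:
--             nums.append(n)
--
--     j = 0
--     temp = []
--     while j < len(nums) - 1:
--         if nums[j] == nums[j + 1]:
--             temp.append(
--                 nums[j] + nums[j + 1]
--             )
--             j += 1
--         else:
--             temp.append(nums[j])
--         j += 1
--
--     if j < len(nums):
--         temp.append(nums[j])
--
--     while len(temp) < len(arr):
--         temp.append(0)
--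
--     return temp
-- ===== SOURCE B (Python) =====
-- from itertools import groupby
-- from typing import List
--
-- def shift_to_left(arr: List[int]):
--     nums = [n for n in arr if n != 0]
--     out = []
--     for v, g in groupby(nums):
--         length = sum(1 for _ in g)
--         out += [2 * v] * (length // 2) + [v] * (length % 2)
--     out += [0] * (len(arr) - len(out))
--     return out
-- ===== Notes on version B (the rewrite author's own statement) =====
-- stated objective: idiomatic
-- what changed: Replaces the index-based while loop with lookahead merging by an itertools.groupby run-length pass: each run of value v and length L contributes L//2 copies of 2*v and L%2 copies of v, then zeros are padded by list arithmetic.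
import Mathlib
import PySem

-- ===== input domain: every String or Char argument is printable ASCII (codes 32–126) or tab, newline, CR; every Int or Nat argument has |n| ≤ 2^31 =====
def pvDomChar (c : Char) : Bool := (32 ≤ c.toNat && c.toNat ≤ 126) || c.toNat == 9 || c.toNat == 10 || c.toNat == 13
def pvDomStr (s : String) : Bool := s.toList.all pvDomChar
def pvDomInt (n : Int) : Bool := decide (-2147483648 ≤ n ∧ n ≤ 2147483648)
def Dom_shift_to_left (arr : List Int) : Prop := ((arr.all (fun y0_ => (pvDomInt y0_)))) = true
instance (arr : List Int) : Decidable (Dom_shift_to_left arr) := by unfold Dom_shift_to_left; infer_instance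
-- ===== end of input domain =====

-- B is an idiomatic re-decomposition (run-length/groupby pass instead of the index-lookahead while loop); same values, same cost.

-- ===== PORT A =====
-- the 'while j < len(nums) - 1' loop with its lookahead nums[j+1], as structural recursion;
-- the trailing 'if j < len(nums)' is the [a] case
def pvLoopA : List Int → List Int
  | [] => []
  | [a] => [a]
  | a :: b :: rest => if a = b then (a + b) :: pvLoopA rest else a :: pvLoopA (b :: rest)

def shift_to_left (arr : List Int) : List Int :=
  let nums := arr.filter (fun n => n ≠ 0)
  let temp := pvLoopA nums
  temp ++ List.replicate (arr.length - temp.length) 0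

-- ===== PORT B =====
-- for a run of value v with length c: c/2 copies of 2*v then c%2 copies of v
def pvEmit (v : Int) (c : Nat) : List Int :=
  List.replicate (c / 2) (2 * v) ++ List.replicate (c % 2) v

-- groupby scan: current run value v with count c
def pvRleGo (v : Int) (c : Nat) : List Int → List Int
  | [] => pvEmit v c
  | b :: rest => if b = v then pvRleGo v (c + 1) rest else pvEmit v c ++ pvRleGo b 1 rest

def pvGroups : List Int → List Int
  | [] => []
  | a :: rest => pvRleGo a 1 rest

def shift_to_left_alt (arr : List Int) : List Int :=
  let nums := arr.filter (fun n => n ≠ 0)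
  let out := pvGroups nums
  out ++ List.replicate (arr.length - out.length) 0

-- ===== PRECONDITION & SPEC =====
def Spec_shift_to_left (arr : List Int) (out : List Int) : Prop := out = shift_to_left_alt arr
instance (arr : List Int) (out : List Int) : Decidable (Spec_shift_to_left arr out) := by unfold Spec_shift_to_left; infer_instance

-- ===== CLAIM (what is proved, stated in full; the proofs are below) =====
def Claim_equal_shift_to_left : Prop := ∀ (arr : List Int), Dom_shift_to_left arr → Spec_shift_to_left arr (shift_to_left arr)

-- ===== LEMMAS AND PROOFS =====

theorem pvEmit_step (v : Int) (n : Nat) : pvEmit v (n + 2) = (v + v) :: pvEmit v n := by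
  have h1 : (n + 2) / 2 = n / 2 + 1 := by omega
  have h2 : (n + 2) % 2 = n % 2 := by omega
  simp [pvEmit, h1, h2, List.replicate_succ, two_mul]

-- A's loop on a maximal run of v's followed by nothing
theorem pvLoopA_run_base : ∀ (c : Nat) (v : Int), pvLoopA (List.replicate c v) = pvEmit v c
  | 0, v => by simp [pvLoopA, pvEmit]
  | 1, v => by simp [pvLoopA, pvEmit, List.replicate_succ]
  | (n + 2), v => by
    have ih := pvLoopA_run_base n v
    simp [List.replicate_succ, pvLoopA, ih, pvEmit_step]

-- A's loop on a maximal run of v's followed by a different value b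
theorem pvLoopA_run_step : ∀ (c : Nat) (v b : Int) (rest : List Int), b ≠ v →
    pvLoopA (List.replicate c v ++ b :: rest) = pvEmit v c ++ pvLoopA (b :: rest)
  | 0, v, b, rest, _ => by simp [pvEmit]
  | 1, v, b, rest, h => by
    cases rest with
    | nil => simp [List.replicate_succ, pvLoopA, pvEmit, Ne.symm h]
    | cons x xs => simp [List.replicate_succ, pvLoopA, pvEmit, Ne.symm h]
  | (n + 2), v, b, rest, h => by
    have ih := pvLoopA_run_step n v b rest h
    simp [List.replicate_succ, pvLoopA, pvEmit_step, ih]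

theorem pvLoopA_rleGo : ∀ (xs : List Int) (v : Int) (c : Nat),
    pvLoopA (List.replicate c v ++ xs) = pvRleGo v c xs
  | [], v, c => by simpa [pvRleGo] using pvLoopA_run_base c v
  | b :: rest, v, c => by
    by_cases h : b = v
    · subst h
      have hrep : List.replicate c b ++ b :: rest = List.replicate (c + 1) b ++ rest := by
        simp [List.replicate_succ' (n := c)]
      rw [hrep, pvLoopA_rleGo rest b (c + 1)]
      simp [pvRleGo]
    · rw [pvLoopA_run_step c v b rest h]
      have := pvLoopA_rleGo rest b 1
      simp only [List.replicate_succ, List.replicate_zero,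
        List.singleton_append] at this
      simp [pvRleGo, h, ← this]

theorem pvLoopA_eq_pvGroups (xs : List Int) : pvLoopA xs = pvGroups xs := by
  cases xs with
  | nil => rfl
  | cons a rest =>
    have := pvLoopA_rleGo rest a 1
    simpa [pvGroups, List.replicate_succ] using this

-- ===== VERDICT (by name: the statement is the Claim_ definition above) =====
theorem shift_to_left_spec : Claim_equal_shift_to_left := by
  intro arr _
  unfold Spec_shift_to_left shift_to_left shift_to_left_alt
  simp [pvLoopA_eq_pvGroups]
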